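-- pv_equiv track=rewrite | github.com/nicedi/Chinese_YesNo_ASR | utils.py | compress_seq
-- ===== SOURCE A (Python) =====
-- def compress_seq(y, blank):
--     t = []
--     seq = []
--     for label in y:
--         if label == blank:
--             if len(t) == 0:
--                 continue
--             [seq.append(i) for i in t]
--             t = []
--         else:
--             if len(t) == 0 or label != t[-1]:
--                 t.append(label)
--     [seq.append(i) for i in t]
--     return seq
-- ===== SOURCE B (Python) =====
-- def compress_seq(y, blank):
--     seq = []
--     prev = None  # sentinel: never equal to any int label
--     for label in y:
--         if label != blank and label != prev:
--             seq.append(label)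
--         prev = label
--     return seq
-- ===== Notes on version B (the rewrite author's own statement) =====
-- stated objective: idiomatic
-- what changed: Replaces the buffer list with its flush-on-blank passes by the canonical one-pass CTC decoder keeping a single previous-label variable updated on every iteration.
import Mathlib
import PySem

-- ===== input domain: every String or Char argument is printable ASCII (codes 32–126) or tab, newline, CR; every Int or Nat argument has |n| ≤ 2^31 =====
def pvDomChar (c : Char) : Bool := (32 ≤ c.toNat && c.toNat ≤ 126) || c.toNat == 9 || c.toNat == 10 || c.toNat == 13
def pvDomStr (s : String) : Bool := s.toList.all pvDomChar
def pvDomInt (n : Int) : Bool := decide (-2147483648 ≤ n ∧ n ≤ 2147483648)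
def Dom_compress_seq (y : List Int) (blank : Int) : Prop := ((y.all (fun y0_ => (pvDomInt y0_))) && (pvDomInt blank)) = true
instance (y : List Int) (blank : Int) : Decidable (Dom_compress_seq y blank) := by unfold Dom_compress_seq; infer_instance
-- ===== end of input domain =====

-- B replaces A's buffer list and flush-on-blank passes by the canonical one-pass CTC
-- decoder that keeps a single previous-label variable (objective: idiomatic).

-- ===== PORT A =====
-- loop body of A: state (seq, t); flush t into seq on a blank, else append to t when new
def compressStepA (blank : Int) (st : List Int × List Int) (label : Int) :
    List Int × List Int :=
  if label = blank then
    if st.2.length = 0 then st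
    else (st.1 ++ st.2, [])
  else
    if st.2.length = 0 ∨ ¬ (some label = PySem.List.pyGet? st.2 (-1)) then
      (st.1, st.2 ++ [label])
    else st

def compress_seq (y : List Int) (blank : Int) : List Int :=
  let st := y.foldl (compressStepA blank) ([], [])
  st.1 ++ st.2

-- ===== PORT B =====
-- loop body of B: state (seq, prev); emit non-blank labels differing from prev, always update prev
def compressStepB (blank : Int) (st : List Int × Option Int) (label : Int) :
    List Int × Option Int :=
  ((if label ≠ blank ∧ some label ≠ st.2 then st.1 ++ [label] else st.1), some label)

def compress_seq_alt (y : List Int) (blank : Int) : List Int :=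
  (y.foldl (compressStepB blank) ([], none)).1

-- ===== PRECONDITION & SPEC =====
def Spec_compress_seq (y : List Int) (blank : Int) (out : List Int) : Prop := out = compress_seq_alt y blank
instance (y : List Int) (blank : Int) (out : List Int) : Decidable (Spec_compress_seq y blank out) := by unfold Spec_compress_seq; infer_instance

-- ===== CLAIM (what is proved, stated in full; the proofs are below) =====
def Claim_equal_compress_seq : Prop := ∀ (y : List Int) (blank : Int), Dom_compress_seq y blank → Spec_compress_seq y blank (compress_seq y blank)

-- ===== LEMMAS AND PROOFS =====

/-- State correspondence: B's output list is A's flushed output plus the pending buffer,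
and B's `prev` is `t`'s last element when `t` is nonempty, otherwise `none` or the blank. -/
def StInv (blank : Int) (a : List Int × List Int) (b : List Int × Option Int) : Prop :=
  b.1 = a.1 ++ a.2 ∧
  ((a.2 = [] ∧ (b.2 = none ∨ b.2 = some blank)) ∨ (a.2 ≠ [] ∧ b.2 = a.2.getLast?))

theorem stepA_B (blank : Int) (a : List Int × List Int) (b : List Int × Option Int)
    (label : Int) (h : StInv blank a b) :
    StInv blank (compressStepA blank a label) (compressStepB blank b label) := by
  obtain ⟨hout, hrel⟩ := h
  rcases hrel with ⟨ht, hp⟩ | ⟨ht, hp⟩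
  · -- buffer empty
    by_cases hb : label = blank
    · simp [compressStepA, compressStepB, StInv, ht, hb, hout]
    · have hpne : ¬ (some label = b.2) := by
        rcases hp with hp | hp <;> simp [hp, Option.some.injEq, hb]
      simp [compressStepA, compressStepB, StInv, ht, hb, hout, hpne]
  · -- buffer nonempty, prev = last of t
    have hlen : a.2.length ≠ 0 := by simpa [List.length_eq_zero_iff] using ht
    have hlast : PySem.List.pyGet? a.2 (-1) = a.2.getLast? :=
      PySem.List.pyGet?_neg_one a.2
    by_cases hb : label = blank
    · simp [compressStepA, compressStepB, StInv, hb, hlen, hout]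
    · by_cases he : some label = a.2.getLast?
      · have hcond : ¬ (a.2.length = 0 ∨ ¬ (some label = PySem.List.pyGet? a.2 (-1))) := by
          simp [hlen, hlast, ← he]
        have hB : ¬ (label ≠ blank ∧ some label ≠ b.2) := by simp [hp, he]
        rw [StInv, compressStepA, if_neg hb, if_neg hcond, compressStepB, if_neg hB]
        exact ⟨hout, Or.inr ⟨ht, he⟩⟩
      · have hc : a.2.length = 0 ∨ ¬ (some label = PySem.List.pyGet? a.2 (-1)) := by
          simp [hlast, he]
        have hpne : ¬ (some label = b.2) := by rw [hp]; exact he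
        have hB : label ≠ blank ∧ some label ≠ b.2 := ⟨hb, hpne⟩
        rw [StInv, compressStepA, if_neg hb, if_pos hc, compressStepB, if_pos hB]
        exact ⟨by simp [hout], Or.inr ⟨by simp, by simp⟩⟩

theorem foldl_inv (blank : Int) : ∀ (y : List Int) (a : List Int × List Int)
    (b : List Int × Option Int), StInv blank a b →
    StInv blank (y.foldl (compressStepA blank) a) (y.foldl (compressStepB blank) b)
  | [], _, _, h => h
  | l :: ys, a, b, h => foldl_inv blank ys _ _ (stepA_B blank a b l h)

-- ===== VERDICT (by name: the statement is the Claim_ definition above) =====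
theorem compress_seq_spec : Claim_equal_compress_seq := by
  intro y blank _
  have h := foldl_inv blank y ([], []) ([], none) ⟨rfl, Or.inl ⟨rfl, Or.inl rfl⟩⟩
  unfold Spec_compress_seq compress_seq compress_seq_alt
  exact (h.1).symm
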